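-- pv_equiv track=rewrite | github.com/openclaw/openclaw | src/research/_scraper.py | apply_token_budget
-- ===== SOURCE A (Python) =====
-- from typing import TYPE_CHECKING, List
--
-- _TOKEN_BUDGET_TRUNCATION_NOTICE = "[...TRUNCATED FOR TOKEN BUDGET...]"
--
-- _EVIDENCE_TOKEN_BUDGET_CHARS = 96_000
--
-- def apply_token_budget(evidence: List[str]) -> str:
--     """Join evidence blocks within _EVIDENCE_TOKEN_BUDGET_CHARS.
--
--     Prevents context overflow when _synthesize sends all evidence to the LLM.
--     Blocks are added in order (highest-priority first) until the budget is used up.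
--     """
--     budget = _EVIDENCE_TOKEN_BUDGET_CHARS
--     separator = "\n\n---\n\n"
--     parts: List[str] = []
--     used = 0
--     for block in evidence:
--         block_len = len(block) + len(separator)
--         if used + block_len > budget:
--             parts.append(_TOKEN_BUDGET_TRUNCATION_NOTICE)
--             break
--         parts.append(block)
--         used += block_len
--     return separator.join(parts)
-- ===== SOURCE B (Python) =====
-- _TOKEN_BUDGET_TRUNCATION_NOTICE = "[...TRUNCATED FOR TOKEN BUDGET...]"
-- _EVIDENCE_TOKEN_BUDGET_CHARS = 96_000
--
--
-- def apply_token_budget(evidence):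
--     """Prefix-sum table + cutoff index + slice, instead of accumulating with break."""
--     separator = "\n\n---\n\n"
--     totals = []
--     run = 0
--     for block in evidence:
--         run += len(block) + len(separator)
--         totals.append(run)
--     cut = next((k for k, t in enumerate(totals) if t > _EVIDENCE_TOKEN_BUDGET_CHARS), None)
--     if cut is None:
--         return separator.join(evidence)
--     return separator.join(list(evidence[:cut]) + [_TOKEN_BUDGET_TRUNCATION_NOTICE])
-- ===== Notes on version B (the rewrite author's own statement) =====
-- stated objective: idiomatic
-- what changed: B builds the prefix-sum cost table first, finds the first index whose running total exceeds the budget, and slices the evidence at that cutoff (appending the notice), instead of interleaving accumulation with an early break inside the join loop.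
import Mathlib
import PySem

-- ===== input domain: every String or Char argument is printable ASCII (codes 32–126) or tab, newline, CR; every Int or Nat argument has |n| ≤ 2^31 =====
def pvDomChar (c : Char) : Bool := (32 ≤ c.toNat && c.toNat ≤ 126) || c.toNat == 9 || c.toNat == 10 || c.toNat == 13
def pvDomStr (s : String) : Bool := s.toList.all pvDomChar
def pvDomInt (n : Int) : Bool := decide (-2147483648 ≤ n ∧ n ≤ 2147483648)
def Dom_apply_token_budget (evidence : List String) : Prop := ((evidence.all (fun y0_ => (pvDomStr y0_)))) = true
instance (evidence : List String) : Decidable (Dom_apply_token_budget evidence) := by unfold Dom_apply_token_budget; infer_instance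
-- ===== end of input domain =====

-- B replaces A's accumulate-with-break loop by a prefix-sum table, a cutoff index and a slice (idiomatic; same cost).

-- ===== PORT A =====
-- A's for-loop with `used` accumulator and early break; parts are produced front-to-back.
def applyLoopA : List String → Int → List String
  | [], _ => []
  | block :: rest, used =>
    let block_len := PySem.Str.len block + PySem.Str.len "\n\n---\n\n"
    if 96000 < used + block_len then ["[...TRUNCATED FOR TOKEN BUDGET...]"]
    else block :: applyLoopA rest (used + block_len)

def apply_token_budget (evidence : List String) : String :=
  PySem.Str.join "\n\n---\n\n" (applyLoopA evidence 0)

-- ===== PORT B =====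
-- running totals of per-block costs, starting from a given running sum
def accumCosts : Int → List String → List Int
  | _, [] => []
  | run, block :: rest =>
    let run' := run + (PySem.Str.len block + PySem.Str.len "\n\n---\n\n")
    run' :: accumCosts run' rest

def apply_token_budget_alt (evidence : List String) : String :=
  let totals := accumCosts 0 evidence
  match totals.findIdx? (fun t => decide (96000 < t)) with
  | none => PySem.Str.join "\n\n---\n\n" evidence
  | some cut => PySem.Str.join "\n\n---\n\n" (evidence.take cut ++ ["[...TRUNCATED FOR TOKEN BUDGET...]"])

-- ===== PRECONDITION & SPEC =====
def Spec_apply_token_budget (evidence : List String) (out : String) : Prop := out = apply_token_budget_alt evidence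
instance (evidence : List String) (out : String) : Decidable (Spec_apply_token_budget evidence out) := by unfold Spec_apply_token_budget; infer_instance

-- ===== CLAIM (what is proved, stated in full; the proofs are below) =====
def Claim_equal_apply_token_budget : Prop := ∀ (evidence : List String), Dom_apply_token_budget evidence → Spec_apply_token_budget evidence (apply_token_budget evidence)

-- ===== LEMMAS AND PROOFS =====

theorem applyLoopA_eq_cutoff (evidence : List String) : ∀ (used : Int),
    applyLoopA evidence used =
      match (accumCosts used evidence).findIdx? (fun t => decide (96000 < t)) with
      | none => evidence
      | some cut => evidence.take cut ++ ["[...TRUNCATED FOR TOKEN BUDGET...]"] := by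
  induction evidence with
  | nil => intro used; simp [applyLoopA, accumCosts]
  | cons block rest ih =>
    intro used
    simp only [applyLoopA, accumCosts, List.findIdx?_cons]
    have e : PySem.Str.len block + PySem.Str.len "\n\n---\n\n" = ((block.length : Int) + 7) := rfl
    rw [e, ih (used + ((block.length : Int) + 7))]
    by_cases h : (96000 : Int) < used + ((block.length : Int) + 7)
    · simp [h]
    · simp only [h, if_false, decide_false]
      cases hf : (accumCosts (used + ((block.length : Int) + 7)) rest).findIdx?
          (fun t => decide (96000 < t)) with
      | none => simp
      | some cut => simp

-- ===== VERDICT (by name: the statement is the Claim_ definition above) =====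
theorem apply_token_budget_spec : Claim_equal_apply_token_budget := by
  intro evidence _
  unfold Spec_apply_token_budget apply_token_budget apply_token_budget_alt
  rw [applyLoopA_eq_cutoff evidence 0]
  cases hf : (accumCosts 0 evidence).findIdx? (fun t => decide (96000 < t)) <;> simp [hf]
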